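-- pv_equiv track=rewrite | github.com/Rohanchaudhari98/Tavily-LangGraph | backend/app/agents/crawl_agent.py | _find_best_crawl_url
-- ===== SOURCE A (Python) =====
-- from typing import Dict, List
--
-- def _find_best_crawl_url(results: List[Dict]) -> Dict:
--     """
--     Find the best URL to start crawling from.
--
--     Prioritizes:
--     1. Pricing pages
--     2. Features pages
--     3. Documentation pages
--     4. Homepage
--
--     Args:
--         results: List of search results
--
--     Returns:
--         Dict with url and focus area
--     """
--     # Priority keywords for crawling
--     priorities = [
--         ("pricing", ["pricing", "plans", "cost"]),
--         ("features", ["features", "capabilities", "product"]),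
--         ("documentation", ["docs", "documentation", "api"]),
--         ("homepage", [""])  # Fallback
--     ]
--
--     for focus, keywords in priorities:
--         for result in results:
--             url = result.get("url", "").lower()
--             title = result.get("title", "").lower()
--
--             # Check if any keyword matches
--             if any(keyword in url or keyword in title for keyword in keywords if keyword):
--                 return {
--                     "url": result["url"],
--                     "focus": focus
--                 }
--
--     # Fallback to first result
--     if results:
--         return {
--             "url": results[0]["url"],
--             "focus": "general"
--         }
--
--     return None
-- ===== SOURCE B (Python) =====
-- from typing import Dict, List
--
-- _KEYWORD_GROUPS = [
--     ("pricing", ["pricing", "plans", "cost"]),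
--     ("features", ["features", "capabilities", "product"]),
--     ("documentation", ["docs", "documentation", "api"]),
-- ]
--
-- def _find_best_crawl_url(results: List[Dict]) -> Dict:
--     """Single pass: keep the earliest result with the smallest matching priority rank."""
--     best = None  # (rank, focus, result)
--     for result in results:
--         url = result.get("url", "").lower()
--         title = result.get("title", "").lower()
--         for rank, (focus, keywords) in enumerate(_KEYWORD_GROUPS):
--             if best is not None and best[0] <= rank:
--                 break  # cannot improve on the current best
--             if any(k in url or k in title for k in keywords):
--                 best = (rank, focus, result)
--                 break
--     if best is not None:
--         return {"url": best[2]["url"], "focus": best[1]}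
--     if results:
--         return {"url": results[0]["url"], "focus": "general"}
--     return None
-- ===== Notes on version B (the rewrite author's own statement) =====
-- stated objective: alternative
-- what changed: A scans the whole result list once per priority group (4 passes, returning on the first match); B makes a single pass over the results, computing each result's best matching priority rank with an early-exit bound and keeping the earliest result of minimal rank.
import Mathlib
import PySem

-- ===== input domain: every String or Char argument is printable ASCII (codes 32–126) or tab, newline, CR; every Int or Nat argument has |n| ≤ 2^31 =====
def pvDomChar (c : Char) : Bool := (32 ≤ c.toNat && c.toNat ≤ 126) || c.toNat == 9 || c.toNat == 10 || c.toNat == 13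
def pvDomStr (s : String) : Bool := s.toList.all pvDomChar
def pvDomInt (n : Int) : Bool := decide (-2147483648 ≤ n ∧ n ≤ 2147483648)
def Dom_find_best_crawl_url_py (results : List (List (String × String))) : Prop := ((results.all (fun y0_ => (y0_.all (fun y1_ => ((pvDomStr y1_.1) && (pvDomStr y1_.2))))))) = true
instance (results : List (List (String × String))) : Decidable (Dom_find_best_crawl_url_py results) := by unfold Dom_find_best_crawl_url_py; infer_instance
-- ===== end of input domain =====

-- B replaces A's four priority-ordered scans of the result list by a single pass that keeps
-- the earliest result of minimal priority rank (same return value everywhere A returns).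

-- ===== PORT A =====
-- result.get(k, "") : first-match association-list lookup with default
def pvGetD (r : List (String × String)) (k : String) : String :=
  (List.lookup k r).getD ""

-- any(keyword in url or keyword in title for keyword in keywords if keyword)
def pvAMatch (url title : String) (kws : List String) : Bool :=
  kws.any (fun k => decide (k ≠ "") && (PySem.Str.isIn k url || PySem.Str.isIn k title))

-- inner 'for result in results' loop of A: first result matching this keyword group.
-- result["url"] raises KeyError in Python when the key is absent; Pre_ excludes exactly that,
-- so the `pvGetD` default "" is never observed inside Pre_.
def pvAScan (focus : String) (kws : List String) : List (List (String × String)) → Option (List (String × String))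
  | [] => none
  | r :: rest =>
    let url := PySem.Str.lower (pvGetD r "url")
    let title := PySem.Str.lower (pvGetD r "title")
    if pvAMatch url title kws then some [("url", pvGetD r "url"), ("focus", focus)]
    else pvAScan focus kws rest

-- outer 'for focus, keywords in priorities' loop
def pvAOuter (results : List (List (String × String))) : List (String × List String) → Option (List (String × String))
  | [] => none
  | (focus, kws) :: ps =>
    match pvAScan focus kws results with
    | some d => some d
    | none => pvAOuter results ps

def find_best_crawl_url_py (results : List (List (String × String))) : Option (List (String × String)) :=
  match pvAOuter results [("pricing", ["pricing", "plans", "cost"]),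
                          ("features", ["features", "capabilities", "product"]),
                          ("documentation", ["docs", "documentation", "api"]),
                          ("homepage", [""])] with
  | some d => some d
  | none =>
    match results with
    | [] => none
    | r0 :: _ => some [("url", pvGetD r0 "url"), ("focus", "general")]

-- ===== PORT B =====
def pvBGroups : List (Nat × String × List String) :=
  [(0, "pricing", ["pricing", "plans", "cost"]),
   (1, "features", ["features", "capabilities", "product"]),
   (2, "documentation", ["docs", "documentation", "api"])]

def pvBAny (url title : String) (kws : List String) : Bool :=
  kws.any (fun k => PySem.Str.isIn k url || PySem.Str.isIn k title)

-- 'best is not None and best[0] <= rank'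
def pvBBound (best : Option (Nat × String × List (String × String))) (rank : Nat) : Bool :=
  match best with
  | none => false
  | some (b, _, _) => b ≤ rank

-- inner 'for rank, (focus, keywords) in enumerate(_KEYWORD_GROUPS)' loop of B
def pvBInner (best : Option (Nat × String × List (String × String))) (url title : String)
    (r : List (String × String)) : List (Nat × String × List String) → Option (Nat × String × List (String × String))
  | [] => best
  | (rank, focus, kws) :: rest =>
    if pvBBound best rank then best
    else if pvBAny url title kws then some (rank, focus, r)
    else pvBInner best url title r rest

def find_best_crawl_url_py_alt (results : List (List (String × String))) : Option (List (String × String)) :=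
  let best := results.foldl (fun best r =>
    pvBInner best (PySem.Str.lower (pvGetD r "url")) (PySem.Str.lower (pvGetD r "title")) r pvBGroups) none
  match best with
  | some (_, focus, r) => some [("url", pvGetD r "url"), ("focus", focus)]
  | none =>
    match results with
    | [] => none
    | r0 :: _ => some [("url", pvGetD r0 "url"), ("focus", "general")]

-- ===== PRECONDITION & SPEC =====
-- lowered url / title of a result
def pvLU (r : List (String × String)) : String := PySem.Str.lower (pvGetD r "url")
def pvLT (r : List (String × String)) : String := PySem.Str.lower (pvGetD r "title")

-- group-g matches r
def pvM0 (r : List (String × String)) : Bool := pvBAny (pvLU r) (pvLT r) ["pricing", "plans", "cost"]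
def pvM1 (r : List (String × String)) : Bool := pvBAny (pvLU r) (pvLT r) ["features", "capabilities", "product"]
def pvM2 (r : List (String × String)) : Bool := pvBAny (pvLU r) (pvLT r) ["docs", "documentation", "api"]

-- the result whose "url" the Python programs read: the first result containing a pricing
-- keyword, else the first containing a features keyword, else documentation, else the head
def pvPreSel (results : List (List (String × String))) : Option (List (String × String)) :=
  match results.find? pvM0 with
  | some r => some r
  | none =>
    match results.find? pvM1 with
    | some r => some r
    | none =>
      match results.find? pvM2 with
      | some r => some r
      | none => results.head?

-- Pre_ excludes exactly the inputs on which the Python programs raise KeyError: the one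
-- result whose "url" is read (pvPreSel) lacks a "url" key.  On every other input A returns.
def Pre_find_best_crawl_url_py (results : List (List (String × String))) : Prop :=
  (match pvPreSel results with
   | none => true
   | some r => (List.lookup "url" r).isSome) = true
instance (results : List (List (String × String))) : Decidable (Pre_find_best_crawl_url_py results) := by
  unfold Pre_find_best_crawl_url_py; infer_instance

def pvWitness_find_best_crawl_url_py : (List (List (String × String))) :=
  [[("url", "https://a.example/pricing")], [("title", "About")]]

def Spec_find_best_crawl_url_py (results : List (List (String × String))) (out : Option (List (String × String))) : Prop := out = find_best_crawl_url_py_alt results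
instance (results : List (List (String × String))) (out : Option (List (String × String))) : Decidable (Spec_find_best_crawl_url_py results out) := by unfold Spec_find_best_crawl_url_py; infer_instance

-- ===== CLAIM (what is proved, stated in full; the proofs are below) =====
def Claim_equal_find_best_crawl_url_py : Prop := ∀ (results : List (List (String × String))), Dom_find_best_crawl_url_py results → Pre_find_best_crawl_url_py results → Spec_find_best_crawl_url_py results (find_best_crawl_url_py results)

-- ===== LEMMAS AND PROOFS =====
-- (rank, focus, r) for the smallest matching group, none if no group matches
def pvUnitOf (r : List (String × String)) : Option (Nat × String × List (String × String)) :=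
  if pvM0 r then some (0, "pricing", r)
  else if pvM1 r then some (1, "features", r)
  else if pvM2 r then some (2, "documentation", r)
  else none

-- keep the strictly smaller rank, left wins ties
def pvMerge (a b : Option (Nat × String × List (String × String))) : Option (Nat × String × List (String × String)) :=
  match a, b with
  | none, b => b
  | a, none => a
  | some (x, f, r), some (y, g, s) => if y < x then some (y, g, s) else some (x, f, r)

theorem pvMerge_none_right (a : Option (Nat × String × List (String × String))) : pvMerge a none = a := by
  cases a <;> rfl

theorem pvMerge_assoc (a b c : Option (Nat × String × List (String × String))) :
    pvMerge (pvMerge a b) c = pvMerge a (pvMerge b c) := by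
  rcases a with _ | ⟨x, f, r⟩ <;> rcases b with _ | ⟨y, g, s⟩ <;> rcases c with _ | ⟨z, h, t⟩ <;>
    simp only [pvMerge] <;> (try split_ifs) <;> simp only [pvMerge] <;> (try split_ifs) <;>
    first | rfl | omega

-- one step of B's inner loop is a merge with the result's unit
theorem pvInner_eq (best : Option (Nat × String × List (String × String))) (r : List (String × String)) :
    pvBInner best (pvLU r) (pvLT r) r pvBGroups = pvMerge best (pvUnitOf r) := by
  rcases best with _ | ⟨b, f, rr⟩ <;>
    simp only [pvBGroups, pvBInner, pvBBound, pvUnitOf, pvMerge, pvM0, pvM1, pvM2] <;>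
    split_ifs <;> simp_all <;> omega

-- B's fold in merge form, generalized over the accumulator
theorem pvFoldl_merge (xs : List (List (String × String))) (s : Option (Nat × String × List (String × String))) :
    xs.foldl (fun b r => pvMerge b (pvUnitOf r)) s =
      pvMerge s (xs.foldl (fun b r => pvMerge b (pvUnitOf r)) none) := by
  induction xs generalizing s with
  | nil => simp [pvMerge_none_right]
  | cons r xs ih =>
    simp only [List.foldl_cons]
    rw [ih (pvMerge s (pvUnitOf r)), ih (pvMerge none (pvUnitOf r)), pvMerge_assoc]
    rfl

-- priority-ordered characterization of B's fold
def pvG (xs : List (List (String × String))) : Option (Nat × String × List (String × String)) :=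
  match xs.find? pvM0 with
  | some r => some (0, "pricing", r)
  | none =>
    match xs.find? pvM1 with
    | some r => some (1, "features", r)
    | none =>
      match xs.find? pvM2 with
      | some r => some (2, "documentation", r)
      | none => none

theorem pvF_eq_G (xs : List (List (String × String))) :
    xs.foldl (fun b r => pvMerge b (pvUnitOf r)) none = pvG xs := by
  induction xs with
  | nil => rfl
  | cons r xs ih =>
    simp only [List.foldl_cons]
    rw [pvFoldl_merge]
    rw [ih]
    show pvMerge (pvMerge none (pvUnitOf r)) (pvG xs) = pvG (r :: xs)
    rcases h0 : pvM0 r <;> rcases h1 : pvM1 r <;> rcases h2 : pvM2 r <;>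
      simp only [pvG, pvUnitOf, h0, h1, h2, List.find?_cons, if_true, if_false, Bool.false_eq_true] <;>
      rcases xs.find? pvM0 with _ | r0 <;> rcases xs.find? pvM1 with _ | r1 <;>
      rcases xs.find? pvM2 with _ | r2 <;> simp [pvMerge]

-- common rendering of the selected (rank, focus, result)
def pvRender (g : Option (Nat × String × List (String × String))) (results : List (List (String × String))) :
    Option (List (String × String)) :=
  match g with
  | some (_, focus, r) => some [("url", pvGetD r "url"), ("focus", focus)]
  | none =>
    match results with
    | [] => none
    | r0 :: _ => some [("url", pvGetD r0 "url"), ("focus", "general")]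

theorem pvAlt_eq (results : List (List (String × String))) :
    find_best_crawl_url_py_alt results = pvRender (pvG results) results := by
  unfold find_best_crawl_url_py_alt
  have h : (results.foldl (fun best r =>
      pvBInner best (PySem.Str.lower (pvGetD r "url")) (PySem.Str.lower (pvGetD r "title")) r pvBGroups) none)
      = pvG results := by
    have : ∀ (best : Option (Nat × String × List (String × String))) (r : List (String × String)),
        pvBInner best (PySem.Str.lower (pvGetD r "url")) (PySem.Str.lower (pvGetD r "title")) r pvBGroups
          = pvMerge best (pvUnitOf r) := fun best r => pvInner_eq best r
    simp only [this]
    exact pvF_eq_G results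
  rw [h]
  rcases pvG results with _ | ⟨g, f, r⟩ <;> rcases results with _ | ⟨r0, rest⟩ <;> rfl

-- A's inner scan is find? followed by rendering
theorem pvAScan_eq (f : String) (kws : List String) (xs : List (List (String × String))) :
    pvAScan f kws xs = (xs.find? (fun r => pvAMatch (pvLU r) (pvLT r) kws)).map
      (fun r => [("url", pvGetD r "url"), ("focus", f)]) := by
  induction xs with
  | nil => rfl
  | cons r xs ih =>
    simp only [pvAScan, List.find?_cons, pvLU, pvLT]
    rcases h : pvAMatch (PySem.Str.lower (pvGetD r "url")) (PySem.Str.lower (pvGetD r "title")) kws <;>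
      simp [ih, pvLU, pvLT]

-- A's keyword filter 'if keyword' is vacuous on the three real groups …
theorem pvAMatch_eq_M0 (r : List (String × String)) :
    pvAMatch (pvLU r) (pvLT r) ["pricing", "plans", "cost"] = pvM0 r := by
  simp [pvAMatch, pvM0, pvBAny]
theorem pvAMatch_eq_M1 (r : List (String × String)) :
    pvAMatch (pvLU r) (pvLT r) ["features", "capabilities", "product"] = pvM1 r := by
  simp [pvAMatch, pvM1, pvBAny]
theorem pvAMatch_eq_M2 (r : List (String × String)) :
    pvAMatch (pvLU r) (pvLT r) ["docs", "documentation", "api"] = pvM2 r := by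
  simp [pvAMatch, pvM2, pvBAny]
-- … and kills the homepage group entirely
theorem pvAMatch_homepage (u t : String) : pvAMatch u t [""] = false := by
  simp [pvAMatch]

theorem pvA_eq (results : List (List (String × String))) :
    find_best_crawl_url_py results = pvRender (pvG results) results := by
  simp only [find_best_crawl_url_py, pvAOuter, pvAScan_eq]
  have e0 : (fun r => pvAMatch (pvLU r) (pvLT r) ["pricing", "plans", "cost"]) = pvM0 :=
    funext pvAMatch_eq_M0
  have e1 : (fun r => pvAMatch (pvLU r) (pvLT r) ["features", "capabilities", "product"]) = pvM1 :=
    funext pvAMatch_eq_M1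
  have e2 : (fun r => pvAMatch (pvLU r) (pvLT r) ["docs", "documentation", "api"]) = pvM2 :=
    funext pvAMatch_eq_M2
  have e3 : (fun r : List (String × String) => pvAMatch (pvLU r) (pvLT r) [""]) = fun _ => false :=
    funext (fun r => pvAMatch_homepage _ _)
  rw [e0, e1, e2, e3]
  have e4 : results.find? (fun _ => false) = none := by simp
  rw [e4]
  simp only [pvG, pvRender, Option.map_none]
  rcases results.find? pvM0 with _ | r0 <;> rcases results.find? pvM1 with _ | r1 <;>
    rcases results.find? pvM2 with _ | r2 <;> rcases results with _ | ⟨rh, rest⟩ <;> rfl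

-- ===== VERDICT (by name: the statement is the Claim_ definition above) =====
theorem find_best_crawl_url_py_spec : Claim_equal_find_best_crawl_url_py := by
  intro results _ _
  unfold Spec_find_best_crawl_url_py
  rw [pvA_eq, pvAlt_eq]
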